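-- pv_equiv track=rewrite | github.com/ElleNajt/fictional-character-vectors | scripts/compute_vuln_line_axis.py | map_lines_to_tokens
-- ===== SOURCE A (Python) =====
-- def map_lines_to_tokens(tokens, code_start, code_end, target_lines):
--     """Map source line numbers to token indices within the code block.
--
--     Returns (vuln_token_indices, non_vuln_token_indices) within [code_start, code_end).
--     """
--     target_set = set(target_lines)
--     current_line = 1  # Source lines are 1-indexed
--     vuln_tokens = []
--     non_vuln_tokens = []
--
--     for i in range(code_start, code_end):
--         tok = tokens[i]
--
--         if current_line in target_set:
--             vuln_tokens.append(i)
--         else: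
--             non_vuln_tokens.append(i)
--
--         # Count newlines in this token to track line number
--         newline_count = tok.count('\n')
--         current_line += newline_count
--
--     return vuln_tokens, non_vuln_tokens
-- ===== SOURCE B (Python) =====
-- from itertools import accumulate
--
--
-- def map_lines_to_tokens(tokens, code_start, code_end, target_lines):
--     """Build-then-filter: first compute the source line each token starts on,
--     then partition the index range by membership in target_lines."""
--     idxs = range(code_start, code_end)
--     counts = [tokens[i].count('\n') for i in idxs]
--     lines = list(accumulate(counts, initial=1))[:-1]
--     target_set = set(target_lines)
--     vuln = [i for i, ln in zip(idxs, lines) if ln in target_set]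
--     non_vuln = [i for i, ln in zip(idxs, lines) if ln not in target_set]
--     return vuln, non_vuln
-- ===== Notes on version B (the rewrite author's own statement) =====
-- stated objective: alternative
-- what changed: A interleaves line tracking and partitioning in one stateful loop; B first builds the per-token line table with itertools.accumulate, then partitions the index range with two comprehensions over the zipped table.
import Mathlib
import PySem

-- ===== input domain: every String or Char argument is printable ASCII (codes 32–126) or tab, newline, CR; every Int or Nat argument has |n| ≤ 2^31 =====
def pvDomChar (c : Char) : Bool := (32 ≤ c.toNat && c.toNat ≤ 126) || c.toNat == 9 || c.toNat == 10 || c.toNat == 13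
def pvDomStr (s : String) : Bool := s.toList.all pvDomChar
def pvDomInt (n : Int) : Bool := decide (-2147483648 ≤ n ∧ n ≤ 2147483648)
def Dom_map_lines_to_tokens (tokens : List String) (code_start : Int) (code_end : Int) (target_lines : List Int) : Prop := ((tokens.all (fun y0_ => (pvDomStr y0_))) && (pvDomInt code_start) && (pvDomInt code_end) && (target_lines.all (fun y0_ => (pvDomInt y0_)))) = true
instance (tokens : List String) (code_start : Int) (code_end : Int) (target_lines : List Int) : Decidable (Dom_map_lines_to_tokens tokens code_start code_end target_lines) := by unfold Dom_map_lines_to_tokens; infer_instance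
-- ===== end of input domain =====

-- B builds the per-token line table first, then partitions the index range; same cost, different decomposition.

-- ===== PORT A =====
def map_lines_to_tokens (tokens : List String) (code_start : Int) (code_end : Int) (target_lines : List Int) : List Int × List Int :=
  let target_set : PySem.Set Int := PySem.Set.ofList target_lines
  let st := (PySem.List.pyRange code_start code_end 1).foldl
    (fun (st : Int × List Int × List Int) i =>
      let tok := PySem.List.pyGetD tokens i ""   -- total under Pre_ (InRange)
      let st' := if PySem.Set.contains target_set st.1
                 then (st.1, st.2.1 ++ [i], st.2.2)
                 else (st.1, st.2.1, st.2.2 ++ [i])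
      (st'.1 + (PySem.Str.count tok "\n" : Int), st'.2.1, st'.2.2))
    (1, [], [])
  (st.2.1, st.2.2)

-- ===== PORT B =====
def map_lines_to_tokens_alt (tokens : List String) (code_start : Int) (code_end : Int) (target_lines : List Int) : List Int × List Int :=
  let idxs := PySem.List.pyRange code_start code_end 1
  let counts := idxs.map (fun i => (PySem.Str.count (PySem.List.pyGetD tokens i "") "\n" : Int))
  let lines := (counts.scanl (· + ·) 1).dropLast   -- accumulate(counts, initial=1)[:-1]
  let target_set : PySem.Set Int := PySem.Set.ofList target_lines
  let vuln := (idxs.zip lines).filterMap (fun p => if PySem.Set.contains target_set p.2 then some p.1 else none)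
  let non_vuln := (idxs.zip lines).filterMap (fun p => if PySem.Set.contains target_set p.2 then none else some p.1)
  (vuln, non_vuln)

-- ===== PRECONDITION & SPEC =====
-- Pre_ excludes exactly the inputs where Python's tokens[i] raises IndexError (index out of range).
def Pre_map_lines_to_tokens (tokens : List String) (code_start : Int) (code_end : Int) (target_lines : List Int) : Prop :=
  code_end ≤ code_start ∨ (-(tokens.length : Int) ≤ code_start ∧ code_end ≤ (tokens.length : Int))
instance (tokens : List String) (code_start : Int) (code_end : Int) (target_lines : List Int) : Decidable (Pre_map_lines_to_tokens tokens code_start code_end target_lines) := by unfold Pre_map_lines_to_tokens; infer_instance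
def pvWitness_map_lines_to_tokens : List String × Int × Int × List Int := (["a\n", "b", "c"], 0, 3, [1])

def Spec_map_lines_to_tokens (tokens : List String) (code_start : Int) (code_end : Int) (target_lines : List Int) (out : List Int × List Int) : Prop := out = map_lines_to_tokens_alt tokens code_start code_end target_lines
instance (tokens : List String) (code_start : Int) (code_end : Int) (target_lines : List Int) (out : List Int × List Int) : Decidable (Spec_map_lines_to_tokens tokens code_start code_end target_lines out) := by unfold Spec_map_lines_to_tokens; infer_instance

-- ===== CLAIM (what is proved, stated in full; the proofs are below) =====
def Claim_equal_map_lines_to_tokens : Prop := ∀ (tokens : List String) (code_start : Int) (code_end : Int) (target_lines : List Int), Dom_map_lines_to_tokens tokens code_start code_end target_lines → Pre_map_lines_to_tokens tokens code_start code_end target_lines → Spec_map_lines_to_tokens tokens code_start code_end target_lines (map_lines_to_tokens tokens code_start code_end target_lines)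

-- ===== LEMMAS AND PROOFS =====

-- A's loop body (proof helper; definitionally equal to the lambda in port A after zeta).
def pvStepA (c : Int → Int) (ts : PySem.Set Int) (st : Int × List Int × List Int) (i : Int) : Int × List Int × List Int :=
  let st' := if PySem.Set.contains ts st.1
             then (st.1, st.2.1 ++ [i], st.2.2)
             else (st.1, st.2.1, st.2.2 ++ [i])
  (st'.1 + c i, st'.2.1, st'.2.2)

-- The common recursive description of both partitions: walk the index list
-- carrying the current line, select indices whose line is (resp. is not) in ts.
def pvSel (c : Int → Int) (ts : PySem.Set Int) (keep : Bool) : List Int → Int → List Int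
  | [], _ => []
  | i :: is, cl =>
      if PySem.Set.contains ts cl == keep then i :: pvSel c ts keep is (cl + c i)
      else pvSel c ts keep is (cl + c i)

theorem pvScanl_ne_nil (b : Int) (l : List Int) : List.scanl (· + ·) b l ≠ [] := by
  cases l <;> simp [List.scanl]

theorem pvFoldA (c : Int → Int) (ts : PySem.Set Int) (idxs : List Int) :
    ∀ (cl : Int) (v nv : List Int),
      idxs.foldl (pvStepA c ts) (cl, v, nv)
      = (cl + (idxs.map c).sum, v ++ pvSel c ts true idxs cl, nv ++ pvSel c ts false idxs cl) := by
  induction idxs with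
  | nil => intro cl v nv; simp [pvSel]
  | cons i is ih =>
      intro cl v nv
      rw [List.foldl_cons]
      by_cases hm : cl ∈ ts
      · have hstep : pvStepA c ts (cl, v, nv) i = (cl + c i, v ++ [i], nv) := by
          simp [pvStepA, hm]
        rw [hstep, ih]
        simp [pvSel, hm, List.append_assoc, add_assoc]
      · have hstep : pvStepA c ts (cl, v, nv) i = (cl + c i, v, nv ++ [i]) := by
          simp [pvStepA, hm]
        rw [hstep, ih]
        simp [pvSel, hm, List.append_assoc, add_assoc]

theorem pvFoldBv (c : Int → Int) (ts : PySem.Set Int) (idxs : List Int) :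
    ∀ (cl : Int),
      ((idxs.zip ((idxs.map c).scanl (· + ·) cl).dropLast).filterMap
        (fun p => if PySem.Set.contains ts p.2 then some p.1 else none))
      = pvSel c ts true idxs cl := by
  induction idxs with
  | nil => intro cl; simp [pvSel]
  | cons i is ih =>
      intro cl
      have hne := pvScanl_ne_nil (cl + c i) (is.map c)
      simp only [List.map_cons, List.scanl_cons]
      rw [List.dropLast_cons_of_ne_nil hne]
      simp only [List.zip_cons_cons, List.filterMap_cons, pvSel]
      by_cases hc : PySem.Set.contains ts cl = true
      · simp only [hc, beq_self_eq_true, if_true]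
        rw [ih]
      · have hc' := eq_false_of_ne_true hc
        simp only [hc']
        rw [if_neg (show ¬((false == true) = true) by decide)]
        exact ih _

theorem pvFoldBn (c : Int → Int) (ts : PySem.Set Int) (idxs : List Int) :
    ∀ (cl : Int),
      ((idxs.zip ((idxs.map c).scanl (· + ·) cl).dropLast).filterMap
        (fun p => if PySem.Set.contains ts p.2 then none else some p.1))
      = pvSel c ts false idxs cl := by
  induction idxs with
  | nil => intro cl; simp [pvSel]
  | cons i is ih =>
      intro cl
      have hne := pvScanl_ne_nil (cl + c i) (is.map c)
      simp only [List.map_cons, List.scanl_cons]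
      rw [List.dropLast_cons_of_ne_nil hne]
      simp only [List.zip_cons_cons, List.filterMap_cons, pvSel]
      by_cases hc : PySem.Set.contains ts cl = true
      · simp only [hc]
        rw [if_neg (show ¬((true == false) = true) by decide)]
        exact ih _
      · have hc' := eq_false_of_ne_true hc
        simp only [hc', beq_self_eq_true, if_true]
        rw [ih]
        simp

-- ===== VERDICT (by name: the statement is the Claim_ definition above) =====
theorem map_lines_to_tokens_spec : Claim_equal_map_lines_to_tokens := by
  intro tokens code_start code_end target_lines _ _
  unfold Spec_map_lines_to_tokens
  have hA : map_lines_to_tokens tokens code_start code_end target_lines =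
      (((PySem.List.pyRange code_start code_end 1).foldl
          (pvStepA (fun i => (PySem.Str.count (PySem.List.pyGetD tokens i "") "\n" : Int))
            (PySem.Set.ofList target_lines)) (1, [], [])).2.1,
       ((PySem.List.pyRange code_start code_end 1).foldl
          (pvStepA (fun i => (PySem.Str.count (PySem.List.pyGetD tokens i "") "\n" : Int))
            (PySem.Set.ofList target_lines)) (1, [], [])).2.2) := rfl
  have hB : map_lines_to_tokens_alt tokens code_start code_end target_lines =
      (((PySem.List.pyRange code_start code_end 1).zip
          (((PySem.List.pyRange code_start code_end 1).map
              (fun i => (PySem.Str.count (PySem.List.pyGetD tokens i "") "\n" : Int))).scanl (· + ·) 1).dropLast).filterMap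
        (fun p => if PySem.Set.contains (PySem.Set.ofList target_lines) p.2 then some p.1 else none),
       ((PySem.List.pyRange code_start code_end 1).zip
          (((PySem.List.pyRange code_start code_end 1).map
              (fun i => (PySem.Str.count (PySem.List.pyGetD tokens i "") "\n" : Int))).scanl (· + ·) 1).dropLast).filterMap
        (fun p => if PySem.Set.contains (PySem.Set.ofList target_lines) p.2 then none else some p.1)) := rfl
  rw [hA, hB,
      pvFoldA (fun i => (PySem.Str.count (PySem.List.pyGetD tokens i "") "\n" : Int))
        (PySem.Set.ofList target_lines) (PySem.List.pyRange code_start code_end 1) 1 [] [],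
      pvFoldBv (fun i => (PySem.Str.count (PySem.List.pyGetD tokens i "") "\n" : Int))
        (PySem.Set.ofList target_lines) (PySem.List.pyRange code_start code_end 1) 1,
      pvFoldBn (fun i => (PySem.Str.count (PySem.List.pyGetD tokens i "") "\n" : Int))
        (PySem.Set.ofList target_lines) (PySem.List.pyRange code_start code_end 1) 1]
  simp
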